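-- pv_equiv track=rewrite | github.com/rlrq/nlr_cluster_survey | cluster_survey_scripts/get_seqs/scripts/fasta_manip.py | adjusted_pos
-- ===== SOURCE A (Python) =====
-- def adjusted_pos(seq, pos):
--     """
--     returns position, adjusted for gaps in alignment
--     """
--     last_pos = 0
--     while True:
--         curr_gaps = seq[last_pos:pos].count('-')
--         if curr_gaps == 0:
--             return pos
--         last_pos = pos
--         pos += curr_gaps
-- ===== SOURCE B (Python) =====
-- def adjusted_pos(seq, pos):
--     """
--     returns position, adjusted for gaps in alignment
--     (single forward scan instead of re-scanning partitioned slices)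
--     """
--     count = 0
--     for i in range(len(seq)):
--         if count == pos:
--             return i
--         if seq[i] != '-':
--             count += 1
--     return len(seq) + (pos - count)
-- ===== Notes on version B (the rewrite author's own statement) =====
-- stated objective: alternative
-- what changed: Replaced A's fixpoint iteration that repeatedly counts '-' in fresh slices seq[last_pos:pos] with a single left-to-right scan keeping a running non-gap counter, returning the first index at which the counter reaches pos (or len(seq)+(pos-count) past the end).
-- outside the precondition, e.g. on adjusted_pos('----a', -2): A returns 1, B returns 2; on adjusted_pos('-a', -1): A returns 0, B returns 0
import Mathlib
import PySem

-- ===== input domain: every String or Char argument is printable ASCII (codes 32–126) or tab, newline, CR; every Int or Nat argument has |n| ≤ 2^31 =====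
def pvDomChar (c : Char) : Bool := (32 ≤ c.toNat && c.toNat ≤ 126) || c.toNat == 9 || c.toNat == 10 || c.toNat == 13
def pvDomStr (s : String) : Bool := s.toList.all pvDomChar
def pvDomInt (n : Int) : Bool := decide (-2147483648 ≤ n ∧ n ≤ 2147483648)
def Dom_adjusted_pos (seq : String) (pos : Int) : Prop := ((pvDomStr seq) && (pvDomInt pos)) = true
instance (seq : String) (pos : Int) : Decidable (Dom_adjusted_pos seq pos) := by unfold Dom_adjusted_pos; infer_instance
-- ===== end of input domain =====

-- B replaces A's slice-recounting fixpoint by one forward scan with a running non-gap counter (alternative single-pass algorithm; no speed claim).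

-- ===== PORT A =====
-- A's `while True` loop: fuel recursion; fuel |seq| + |pos| + 2 strictly exceeds the number of
-- iterations the Python loop can perform (pos grows by ≥ 1 per iteration, and the loop stops within
-- two iterations once last_pos ≥ len(seq)); the fuel-0 branch is unreachable.
-- Python's str.count('-') of the one-character string '-' equals the character count, ported as List.count.
def adjustedPosLoop (l : List Char) : Nat → Int → Int → Int
  | 0, _, pos => pos
  | fuel + 1, last_pos, pos =>
    let curr_gaps : Int := ((PySem.List.slice l (some last_pos) (some pos)).count '-' : Int)
    if curr_gaps = 0 then pos
    else adjustedPosLoop l fuel pos (pos + curr_gaps)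

def adjusted_pos (seq : String) (pos : Int) : Int :=
  adjustedPosLoop seq.toList (seq.toList.length + pos.natAbs + 2) 0 pos

-- ===== PORT B =====
-- B's `for i in range(len(seq))` scan: structural recursion over the characters, carrying i and count.
def adjustedPosScan (pos : Int) : List Char → Int → Int → Int
  | [], i, count => i + (pos - count)
  | c :: rest, i, count =>
    if count = pos then i
    else adjustedPosScan pos rest (i + 1) (if c = '-' then count else count + 1)

def adjusted_pos_alt (seq : String) (pos : Int) : Int :=
  adjustedPosScan pos seq.toList 0 0

-- ===== PRECONDITION & SPEC =====
-- Pre_ excludes negative pos: an ungapped sequence position is a nonnegative index, so negative pos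
-- is outside the natural domain, and A's value there is an artefact of Python's negative-slice wraparound.
def Pre_adjusted_pos (seq : String) (pos : Int) : Prop := 0 ≤ pos
instance (seq : String) (pos : Int) : Decidable (Pre_adjusted_pos seq pos) := by unfold Pre_adjusted_pos; infer_instance

def pvWitness_adjusted_pos : String × Int := ("a-b", 2)

def Spec_adjusted_pos (seq : String) (pos : Int) (out : Int) : Prop := out = adjusted_pos_alt seq pos
instance (seq : String) (pos : Int) (out : Int) : Decidable (Spec_adjusted_pos seq pos out) := by unfold Spec_adjusted_pos; infer_instance

-- ===== CLAIM (what is proved, stated in full; the proofs are below) =====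
def Claim_equal_adjusted_pos : Prop := ∀ (seq : String) (pos : Int), Dom_adjusted_pos seq pos → Pre_adjusted_pos seq pos → Spec_adjusted_pos seq pos (adjusted_pos seq pos)

-- ===== LEMMAS AND PROOFS =====

-- ngx l j = number of non-gap characters among the first j characters, counting every virtual
-- position past the end of l as non-gap; equivalently j minus the gaps among the first j.
def ngx (l : List Char) (j : Nat) : Int := (j : Int) - ((l.take j).count '-' : Int)

theorem ngx_zero (l : List Char) : ngx l 0 = 0 := by simp [ngx]

theorem ngx_nil (m : Nat) : ngx [] m = m := by simp [ngx]

theorem ngx_cons (c : Char) (rest : List Char) (j : Nat) :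
    ngx (c :: rest) (j + 1) = (if c = '-' then 0 else 1) + ngx rest j := by
  simp only [ngx, List.take_succ_cons, List.count_cons, beq_iff_eq]
  split_ifs with h <;> push_cast <;> omega

theorem ngx_mono (l : List Char) {j k : Nat} (h : j ≤ k) : ngx l j ≤ ngx l k := by
  have hsplit : l.take k = l.take j ++ (l.drop j).take (k - j) := by
    rw [← List.take_add, Nat.add_sub_cancel' h]
  have hlen : ((l.drop j).take (k - j)).length ≤ k - j := by
    simp
  have hcnt : ((l.drop j).take (k - j)).count '-' ≤ ((l.drop j).take (k - j)).length :=
    List.count_le_length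
  simp only [ngx, hsplit, List.count_append]
  omega

theorem ngx_upper (l : List Char) {j k : Nat} (h : j ≤ k) : ngx l k ≤ ngx l j + ((k : Int) - j) := by
  have hsplit : l.take k = l.take j ++ (l.drop j).take (k - j) := by
    rw [← List.take_add, Nat.add_sub_cancel' h]
  simp only [ngx, hsplit, List.count_append]
  omega

-- B's accumulators shift out: the scan from (i, count) is i plus the scan of pos - count from scratch.
theorem scan_shift (l : List Char) (i count pos : Int) :
    adjustedPosScan pos l i count = i + adjustedPosScan (pos - count) l 0 0 := by
  induction l generalizing i count pos with
  | nil => simp [adjustedPosScan]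
  | cons c rest ih =>
    simp only [adjustedPosScan]
    by_cases h : count = pos
    · have h' : (0 : Int) = pos - count := by omega
      rw [if_pos h, if_pos h']
      ring
    · have h0 : ¬ ((0 : Int) = pos - count) := by omega
      rw [if_neg h, if_neg h0,
        ih (i + 1) (if c = '-' then count else count + 1) pos,
        ih (0 + 1) (if c = '-' then 0 else 0 + 1) (pos - count)]
      rw [show pos - (if c = '-' then count else count + 1)
            = (pos - count) - (if c = '-' then (0:Int) else 0 + 1) from by split_ifs <;> ring]
      omega

-- Characterisation of B: if m is the least index with ngx l m = pos, B's scan returns m.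
theorem scan_char (l : List Char) (pos : Int) (m : Nat)
    (hm : ngx l m = pos) (hleast : ∀ j : Nat, j < m → ngx l j < pos) :
    adjustedPosScan pos l 0 0 = m := by
  induction l generalizing pos m with
  | nil =>
    simp only [ngx_nil] at hm
    simp [adjustedPosScan, ← hm]
  | cons c rest ih =>
    by_cases hp : pos = 0
    · have hm0 : m = 0 := by
        by_contra hne
        have := hleast 0 (Nat.pos_of_ne_zero hne)
        rw [ngx_zero] at this; omega
      simp [adjustedPosScan, hp, hm0]
    · have hm0 : m ≠ 0 := by
        rintro rfl
        rw [ngx_zero] at hm; exact hp hm.symm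
      obtain ⟨m', rfl⟩ := Nat.exists_eq_succ_of_ne_zero hm0
      have hstep : ngx (c :: rest) (m' + 1) = (if c = '-' then 0 else 1) + ngx rest m' :=
        ngx_cons c rest m'
      set δ : Int := if c = '-' then 0 else 1 with hδ
      have hm' : ngx rest m' = pos - δ := by rw [hstep] at hm; omega
      have hleast' : ∀ j : Nat, j < m' → ngx rest j < pos - δ := by
        intro j hj
        have := hleast (j + 1) (by omega)
        rw [ngx_cons] at this
        omega
      have hrec := ih (pos - δ) m' hm' hleast'
      simp only [adjustedPosScan]
      rw [if_neg (by omega : ¬ (0 : Int) = pos)]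
      rw [scan_shift]
      have : (if c = '-' then (0:Int) else 0 + 1) = δ := by
        rw [hδ]; split_ifs <;> ring
      rw [show (if c = '-' then (0:Int) else 0 + 1) = δ by rw [hδ]; split_ifs <;> ring]
      rw [hrec]
      push_cast; ring

-- The gap count of slice l[last:p] for 0 ≤ last ≤ p is the difference of prefix gap counts.
theorem slice_count_sub (l : List Char) (last p : Int) (h0 : 0 ≤ last) (hlp : last ≤ p) :
    ((PySem.List.slice l (some last) (some p)).count '-' : Int)
      = ((l.take p.toNat).count '-' : Int) - ((l.take last.toNat).count '-' : Int) := by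
  rw [PySem.List.slice_toNat l h0 (le_trans h0 hlp)]
  have hle : last.toNat ≤ p.toNat := Int.toNat_le_toNat hlp
  have hsplit : l.take p.toNat = l.take last.toNat ++ (l.drop last.toNat).take (p.toNat - last.toNat) := by
    rw [← List.take_add, Nat.add_sub_cancel' hle]
  rw [hsplit, List.count_append]
  push_cast; ring

-- Main invariant for A's loop: from a reachable state (last, p) it returns B's answer.
theorem loop_eq_scan (l : List Char) (fuel : Nat) (last p p0 : Int)
    (h0 : 0 ≤ last) (hlp : last ≤ p) (hcase : last = 0 ∨ last < p)
    (hinv : p = p0 + ((l.take last.toNat).count '-' : Int))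
    (hfuel1 : 1 ≤ fuel) (hfuel : l.length + 1 ≤ fuel + last.toNat) :
    adjustedPosLoop l fuel last p = adjustedPosScan p0 l 0 0 := by
  induction fuel generalizing last p with
  | zero => omega
  | succ fuel ih =>
    have hp0 : 0 ≤ p := le_trans h0 hlp
    simp only [adjustedPosLoop]
    set g : Int := ((PySem.List.slice l (some last) (some p)).count '-' : Int) with hg
    have hgsub := slice_count_sub l last p h0 hlp
    by_cases hz : g = 0
    · -- return p; show p is the least index with ngx = p0
      rw [if_pos hz]
      have hcntlast : ((l.take last.toNat).count '-' : Int) = p - p0 := by omega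
      have hcntp : ((l.take p.toNat).count '-' : Int) = p - p0 := by
        rw [hg] at hz; omega
      have hngx_last : ngx l last.toNat = p0 - (p - last) := by
        simp only [ngx, hcntlast]
        rw [Int.toNat_of_nonneg h0]; ring
      have hm : ngx l p.toNat = p0 := by
        simp only [ngx, hcntp]
        rw [Int.toNat_of_nonneg hp0]; ring
      have hleast : ∀ j : Nat, j < p.toNat → ngx l j < p0 := by
        intro j hj
        rcases Nat.lt_or_ge j last.toNat with hjl | hjl
        · have h1 := ngx_mono l (Nat.le_of_lt hjl)
          have : last < p := by
            rcases hcase with rfl | h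
            · simp at hjl
            · exact h
          omega
        · have h2 := ngx_upper l hjl
          rw [hngx_last] at h2
          have : (j : Int) < p := by
            have := Int.toNat_of_nonneg hp0; omega
          have hl0 : (last.toNat : Int) = last := Int.toNat_of_nonneg h0
          omega
      have := scan_char l p0 p.toNat hm hleast
      rw [this, Int.toNat_of_nonneg hp0]
    · -- continue with (p, p + g)
      rw [if_neg hz]
      have hgpos : 0 < g := by
        have : 0 ≤ g := by rw [hg]; positivity
        omega
      -- the slice is nonempty, so last.toNat < l.length and last < p
      have hne : (PySem.List.slice l (some last) (some p)) ≠ [] := by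
        intro hcontra
        rw [hg, hcontra] at hgpos; simp at hgpos
      rw [PySem.List.slice_toNat l h0 hp0] at hne
      have hdrop_ne : l.drop last.toNat ≠ [] := by
        intro hcontra; rw [hcontra] at hne; simp at hne
      have hlast_lt : last.toNat < l.length := by
        by_contra hge
        exact hdrop_ne (List.drop_eq_nil_of_le (by omega))
      have htake_pos : 0 < p.toNat - last.toNat := by
        by_contra hge
        exact hne (by simp [Nat.le_zero.mp (Nat.le_of_not_lt hge)])
      have hlplt : last < p := by
        have hl0 : (last.toNat : Int) = last := Int.toNat_of_nonneg h0
        have hp0' : (p.toNat : Int) = p := Int.toNat_of_nonneg hp0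
        omega
      exact ih p (p + g) hp0 (by omega) (Or.inr (by omega))
        (by omega)
        (by omega)
        (by omega)

-- ===== VERDICT (by name: the statement is the Claim_ definition above) =====
theorem adjusted_pos_spec : Claim_equal_adjusted_pos := by
  intro seq pos _ hpre
  unfold Spec_adjusted_pos adjusted_pos adjusted_pos_alt
  exact loop_eq_scan seq.toList (seq.toList.length + pos.natAbs + 2) 0 pos pos
    le_rfl hpre (Or.inl rfl) (by simp) (by omega) (by simp; omega)
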